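-- pv_equiv track=rewrite | github.com/SubhamKumar-Gaurav/DSA-Python | Dynamic_Programming.py | minPagesDP
-- ===== SOURCE A (Python) =====
-- def minPagesDP(arr, k) :
--     n=len(arr)
--     dp=[[0 for i in range(n+1)] for j in range(k+1)]
--     for i in range(1, n+1) :
--         dp[1][i]=sum(arr[:i])
--     for i in range(1, k+1) :
--         dp[i][1]=arr[0]
--     for i in range(2, k+1) :
--         for j in range(2, n+1) :
--             res=float("inf")
--             for p in range(1, j) :
--                 res=min(res, max(dp[i-1][p], sum(arr[p:j])))
--             dp[i][j]=res
--     return dp[k][n]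
-- ===== SOURCE B (Python) =====
-- def minPagesDP(arr, k):
--     if k <= 0:
--         return 0
--     n = len(arr)
--     pre = [0]
--     for x in arr:
--         pre.append(pre[-1] + x)
--     prev = pre
--     for _ in range(k - 1):
--         cur = [0, arr[0]]
--         for j in range(2, n + 1):
--             cur.append(min(max(prev[p], pre[j] - pre[p]) for p in range(1, j)))
--         prev = cur
--     return prev[n]
-- ===== Notes on version B (the rewrite author's own statement) =====
-- stated objective: faster
-- what changed: B precomputes a prefix-sum array so each range sum is O(1), and keeps only the previous DP row (rolling 1-D rows) instead of A's full (k+1)x(n+1) table with an O(n) sum recomputed inside the innermost loop.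
import Mathlib
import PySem

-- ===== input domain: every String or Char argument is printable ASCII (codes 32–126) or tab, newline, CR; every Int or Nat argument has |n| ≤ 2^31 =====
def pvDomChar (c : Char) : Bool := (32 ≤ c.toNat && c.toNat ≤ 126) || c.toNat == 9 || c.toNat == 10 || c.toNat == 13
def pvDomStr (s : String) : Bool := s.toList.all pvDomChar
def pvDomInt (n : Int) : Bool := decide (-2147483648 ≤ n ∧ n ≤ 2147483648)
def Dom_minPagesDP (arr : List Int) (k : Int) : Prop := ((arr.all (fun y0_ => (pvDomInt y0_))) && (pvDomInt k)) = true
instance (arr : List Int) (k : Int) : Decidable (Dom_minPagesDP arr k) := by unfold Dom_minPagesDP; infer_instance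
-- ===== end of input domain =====

-- B change (one honest line): B keeps prefix sums and only the previous DP row, giving O(1)
-- range sums in the recurrence (O(k*n^2)) instead of A's full table with O(n) sums (O(k*n^3)).

-- ===== PORT A =====
-- dp[i][j] read / write on the list-of-lists table, as Python indexing does
def pvGet2 (dp : List (List Int)) (i j : Int) : Int :=
  PySem.List.pyGetD (PySem.List.pyGetD dp i []) j 0

def pvSet2 (dp : List (List Int)) (i j : Int) (v : Int) : List (List Int) :=
  PySem.List.pySetD dp i (PySem.List.pySetD (PySem.List.pyGetD dp i []) j v)

-- res = min(res, x) where res starts as float("inf"): none plays inf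
def pvMinO (res : Option Int) (x : Int) : Int :=
  match res with
  | none => x
  | some r => min r x

def minPagesDP (arr : List Int) (k : Int) : Int :=
  let n : Int := arr.length
  let dp : List (List Int) :=
    (PySem.List.pyRange 0 (k+1) 1).map (fun _ =>
      (PySem.List.pyRange 0 (n+1) 1).map (fun _ => (0 : Int)))
  let dp := (PySem.List.pyRange 1 (n+1) 1).foldl (fun dp i =>
      pvSet2 dp 1 i (PySem.List.slice arr none (some i)).sum) dp
  let dp := (PySem.List.pyRange 1 (k+1) 1).foldl (fun dp i =>
      pvSet2 dp i 1 (PySem.List.pyGetD arr 0 0)) dp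
  let dp := (PySem.List.pyRange 2 (k+1) 1).foldl (fun dp i =>
      (PySem.List.pyRange 2 (n+1) 1).foldl (fun dp j =>
        let res : Option Int :=
          (PySem.List.pyRange 1 j 1).foldl (fun res p =>
            some (pvMinO res (max (pvGet2 dp (i-1) p)
                                  (PySem.List.slice arr (some p) (some j)).sum))) none
        pvSet2 dp i j (res.getD 0)) dp) dp
  pvGet2 dp k n

-- ===== PORT B =====
def minPagesDP_alt (arr : List Int) (k : Int) : Int :=
  if k ≤ 0 then 0
  else
    let n : Int := arr.length
    let pre : List Int := arr.foldl (fun pre x => pre ++ [PySem.List.pyGetD pre (-1) 0 + x]) [0]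
    let prev : List Int := pre
    let prev := (PySem.List.pyRange 0 (k-1) 1).foldl (fun prev _ =>
        (PySem.List.pyRange 2 (n+1) 1).foldl (fun cur j =>
          cur ++ [(PySem.List.min? ((PySem.List.pyRange 1 j 1).map (fun p =>
              max (PySem.List.pyGetD prev p 0)
                  (PySem.List.pyGetD pre j 0 - PySem.List.pyGetD pre p 0)))
              (fun x => x)).getD 0])
        [0, PySem.List.pyGetD arr 0 0]) prev
    PySem.List.pyGetD prev n 0

-- ===== PRECONDITION & SPEC =====
-- Pre_ excludes exactly the inputs where A raises an IndexError: k < 0 (dp[k] out of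
-- range), k = 0 with a nonempty arr (dp[1] out of range), and k ≥ 1 with empty arr (arr[0]).
def Pre_minPagesDP (arr : List Int) (k : Int) : Prop :=
  (1 ≤ k ∧ arr ≠ []) ∨ (k = 0 ∧ arr = [])
instance (arr : List Int) (k : Int) : Decidable (Pre_minPagesDP arr k) := by
  unfold Pre_minPagesDP; infer_instance

def pvWitness_minPagesDP : List Int × Int := ([12, 34, 67, 90], 2)

def Spec_minPagesDP (arr : List Int) (k : Int) (out : Int) : Prop := out = minPagesDP_alt arr k
instance (arr : List Int) (k : Int) (out : Int) : Decidable (Spec_minPagesDP arr k out) := by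
  unfold Spec_minPagesDP; infer_instance

-- ===== CLAIM (what is proved, stated in full; the proofs are below) =====
def Claim_equal_minPagesDP : Prop :=
  ∀ (arr : List Int) (k : Int), Dom_minPagesDP arr k → Pre_minPagesDP arr k →
    Spec_minPagesDP arr k (minPagesDP arr k)

-- ===== LEMMAS AND PROOFS =====

-- prefix sum of the first m elements; the common currency of both proofs
def pvS (arr : List Int) (m : Nat) : Int := (arr.take m).sum

-- min of a list through Python's 'res = inf; res = min(res, x)' loop
def pvMinL (l : List Int) : Int :=
  (l.foldl (fun res x => some (pvMinO res x)) none).getD 0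

-- one step of the book-allocation recurrence on a row given as a function
def pvRowNext (arr : List Int) (r : Nat → Int) (j : Nat) : Int :=
  if j = 0 then 0
  else if j = 1 then arr.headD 0
  else pvMinL ((List.range (j-1)).map (fun t => max (r (t+1)) (pvS arr j - pvS arr (t+1))))

-- pvRow arr i = the DP row for (i+1) partitions
def pvRow (arr : List Int) : Nat → Nat → Int
  | 0 => pvS arr
  | i+1 => pvRowNext arr (pvRow arr i)

-- Nat-indexed read of A's table
def pvG2 (dp : List (List Int)) (i j : Nat) : Int := (dp.getD i []).getD j 0

-- the table dp has K+1 rows of length N+1 and contents f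
def pvTab (dp : List (List Int)) (K N : Nat) (f : Nat → Nat → Int) : Prop :=
  dp.length = K+1 ∧ (∀ i ≤ K, (dp.getD i []).length = N+1) ∧
  (∀ i ≤ K, ∀ j ≤ N, pvG2 dp i j = f i j)

lemma pvRow_zero (arr : List Int) (i : Nat) : pvRow arr i 0 = 0 := by
  cases i <;> simp [pvRow, pvRowNext, pvS]

lemma pvRow_one (arr : List Int) (i : Nat) : pvRow arr i 1 = arr.headD 0 := by
  cases i with
  | zero => cases arr <;> simp [pvRow, pvS]
  | succ m => simp [pvRow, pvRowNext]

lemma pvSum_slice (arr : List Int) (p j : Nat) (h : p ≤ j) :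
    (PySem.List.slice arr (some (p:Int)) (some (j:Int))).sum = pvS arr j - pvS arr p := by
  rw [PySem.List.slice_natCast]
  have h2 : pvS arr j = pvS arr p + ((arr.drop p).take (j-p)).sum := by
    unfold pvS
    rw [← List.sum_append, ← List.take_add, Nat.add_sub_cancel' h]
  omega

lemma foldl_minO_some (l : List Int) (a : Int) :
    l.foldl (fun res x => some (pvMinO res x)) (some a) = some (l.foldl min a) := by
  induction l generalizing a with
  | nil => rfl
  | cons x t ih => rw [List.foldl_cons, show pvMinO (some a) x = min a x from rfl, ih, List.foldl_cons]

lemma pvMinL_cons (x : Int) (t : List Int) : pvMinL (x :: t) = t.foldl min x := by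
  rw [pvMinL, List.foldl_cons, show some (pvMinO none x) = some x from rfl, foldl_minO_some]
  rfl

lemma pvMinL_eq_min? (l : List Int) (h : l ≠ []) :
    pvMinL l = (PySem.List.min? l (fun x => x)).getD 0 := by
  cases l with
  | nil => exact absurd rfl h
  | cons x t => rw [PySem.List.min?_id_cons, pvMinL_cons]; rfl

lemma pvRowNext_succ (arr : List Int) (r : Nat → Int) (m : Nat) (h1 : 1 ≤ m) :
    pvRowNext arr r (m+1)
      = pvMinL ((List.range m).map (fun t => max (r (t+1)) (pvS arr (m+1) - pvS arr (t+1)))) := by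
  unfold pvRowNext
  rw [if_neg (by omega), if_neg (by omega)]
  norm_num

lemma pyRange_one_nat_map {β : Type} (f : Int → β) (m : Nat) :
    (PySem.List.pyRange 1 ((m:Int)+1) 1).map f = (List.range m).map (fun (t : Nat) => f ((t:Int)+1)) := by
  rw [PySem.List.pyRange_one]
  have h : ((m:Int)+1-1).toNat = m := by omega
  rw [h, List.map_map]
  apply List.map_congr_left
  intro t _
  simp only [Function.comp_apply]
  rw [add_comm]

-- ===== B-side =====

lemma pvPre_go (arr : List Int) : ∀ (xs ys : List Int), arr = ys ++ xs →
    xs.foldl (fun pre x => pre ++ [PySem.List.pyGetD pre (-1) 0 + x])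
        ((List.range (ys.length+1)).map (pvS arr))
    = (List.range (arr.length+1)).map (pvS arr) := by
  intro xs
  induction xs with
  | nil => intro ys h; subst h; simp
  | cons x xs ih =>
    intro ys h
    rw [List.foldl_cons]
    have hacc : (List.range (ys.length+1)).map (pvS arr)
        = (List.range ys.length).map (pvS arr) ++ [pvS arr ys.length] := by
      rw [List.range_succ, List.map_append, List.map_singleton]
    have hlast : PySem.List.pyGetD ((List.range (ys.length+1)).map (pvS arr)) (-1) 0
        = pvS arr ys.length := by
      rw [hacc, PySem.List.pyGetD_neg_one_append_singleton]
    have hsum : pvS arr ys.length + x = pvS arr (ys.length+1) := by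
      subst h
      unfold pvS
      rw [List.take_add]
      simp [List.take_left', List.drop_left']
    have hnew : (List.range (ys.length+1)).map (pvS arr)
          ++ [PySem.List.pyGetD ((List.range (ys.length+1)).map (pvS arr)) (-1) 0 + x]
        = (List.range ((ys ++ [x]).length+1)).map (pvS arr) := by
      rw [hlast, hsum]
      rw [show (ys ++ [x]).length = ys.length + 1 by simp]
      rw [List.range_succ (n := ys.length+1), List.map_append, List.map_singleton]
    rw [hnew]
    exact ih (ys ++ [x]) (by simp [h])

lemma pvPre_eq (arr : List Int) :
    arr.foldl (fun pre x => pre ++ [PySem.List.pyGetD pre (-1) 0 + x]) [0]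
    = (List.range (arr.length+1)).map (pvS arr) := by
  have h := pvPre_go arr arr [] (by simp)
  simpa [pvS] using h

lemma pvB_inner (arr : List Int) (r : Nat → Int) (m : Nat) (h1 : 1 ≤ m) (h2 : m ≤ arr.length) :
    (PySem.List.pyRange 2 ((m:Int)+1) 1).foldl
      (fun cur j => cur ++ [(PySem.List.min? ((PySem.List.pyRange 1 j 1).map (fun p =>
          max (PySem.List.pyGetD ((List.range (arr.length+1)).map r) p 0)
              (PySem.List.pyGetD ((List.range (arr.length+1)).map (pvS arr)) j 0 -
               PySem.List.pyGetD ((List.range (arr.length+1)).map (pvS arr)) p 0)))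
          (fun x => x)).getD 0])
      [0, PySem.List.pyGetD arr 0 0]
    = (List.range (m+1)).map (pvRowNext arr r) := by
  revert h2
  induction m, h1 using Nat.le_induction with
  | base =>
    intro _
    rw [show (((1:Nat):Int)+1) = 2 by norm_num, PySem.List.pyRange_one_eq_nil (le_refl 2),
        List.foldl_nil]
    have h0 : PySem.List.pyGetD arr 0 0 = arr.headD 0 := by
      rw [PySem.List.pyGetD_zero]; cases arr <;> rfl
    rw [h0]
    rw [show (1:Nat)+1 = 2 from rfl, List.range_succ, List.range_one]
    simp [pvRowNext]
  | succ m hm ih =>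
    intro h2
    have hb : (((m+1:Nat):Int)+1) = ((m:Int)+1)+1 := by push_cast; ring
    rw [hb, PySem.List.pyRange_one_succ_right (by omega : (2:Int) ≤ (m:Int)+1),
        List.foldl_append, ih (by omega), List.foldl_cons, List.foldl_nil]
    rw [List.range_succ (n := m+1), List.map_append, List.map_singleton]
    congr 1
    -- the freshly appended candidate equals pvRowNext arr r (m+1)
    rw [pyRange_one_nat_map]
    have hmap : (List.range m).map (fun (t : Nat) =>
          max (PySem.List.pyGetD ((List.range (arr.length+1)).map r) ((t:Int)+1) 0)
              (PySem.List.pyGetD ((List.range (arr.length+1)).map (pvS arr)) ((m:Int)+1) 0 -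
               PySem.List.pyGetD ((List.range (arr.length+1)).map (pvS arr)) ((t:Int)+1) 0))
        = (List.range m).map (fun (t : Nat) => max (r (t+1)) (pvS arr (m+1) - pvS arr (t+1))) := by
      apply List.map_congr_left
      intro t ht
      rw [List.mem_range] at ht
      have c1 : ((t:Int)+1) = (((t+1:Nat)):Int) := by push_cast; ring
      have c2 : ((m:Int)+1) = (((m+1:Nat)):Int) := by push_cast; ring
      rw [c1, c2, PySem.List.pyGetD_natCast, PySem.List.pyGetD_natCast, PySem.List.pyGetD_natCast,
          PySem.List.getD_map_range _ _ _ _ (by omega),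
          PySem.List.getD_map_range _ _ _ _ (by omega),
          PySem.List.getD_map_range _ _ _ _ (by omega)]
    rw [hmap, ← pvMinL_eq_min? _ (by
          simp only [ne_eq, List.map_eq_nil_iff, List.range_eq_nil]
          omega),
        pvRowNext_succ arr r m hm]

lemma pvB_rows (arr : List Int) (hN : 1 ≤ arr.length) : ∀ (c : Nat),
    (PySem.List.pyRange 0 ((c:Nat):Int) 1).foldl (fun prev _ =>
      (PySem.List.pyRange 2 ((arr.length:Int)+1) 1).foldl
      (fun cur j => cur ++ [(PySem.List.min? ((PySem.List.pyRange 1 j 1).map (fun p =>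
          max (PySem.List.pyGetD prev p 0)
              (PySem.List.pyGetD ((List.range (arr.length+1)).map (pvS arr)) j 0 -
               PySem.List.pyGetD ((List.range (arr.length+1)).map (pvS arr)) p 0)))
          (fun x => x)).getD 0])
      [0, PySem.List.pyGetD arr 0 0])
      ((List.range (arr.length+1)).map (pvS arr))
    = (List.range (arr.length+1)).map (pvRow arr c) := by
  intro c
  induction c with
  | zero =>
      rw [show (((0:Nat)):Int) = 0 from rfl, PySem.List.pyRange_one_eq_nil (le_refl 0),
          List.foldl_nil]
      rfl
  | succ c ih =>
      rw [show (((c+1:Nat)):Int) = (c:Int)+1 by push_cast; ring,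
          PySem.List.pyRange_one_succ_right (by positivity : (0:Int) ≤ (c:Int)),
          List.foldl_append, ih, List.foldl_cons, List.foldl_nil]
      exact pvB_inner arr (pvRow arr c) arr.length hN le_rfl

lemma pvB_eq (arr : List Int) (k : Int) (hk : 1 ≤ k) (harr : arr ≠ []) :
    minPagesDP_alt arr k = pvRow arr (k.toNat - 1) arr.length := by
  have hN : 1 ≤ arr.length := List.length_pos_of_ne_nil harr
  unfold minPagesDP_alt
  rw [if_neg (by omega : ¬ k ≤ 0)]
  simp only [pvPre_eq]
  have hc : k - 1 = (((k-1).toNat : Nat) : Int) := by omega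
  rw [hc, pvB_rows arr hN ((k-1).toNat),
      PySem.List.pyGetD_natCast, PySem.List.getD_map_range _ _ _ _ (by omega),
      show (k-1).toNat = k.toNat - 1 by omega]

-- ===== A-side =====

lemma pvG2_natCast (dp : List (List Int)) (i j : Nat) :
    pvGet2 dp (i:Int) (j:Int) = pvG2 dp i j := by
  simp [pvGet2, pvG2, PySem.List.pyGetD_natCast]

lemma pvTab_congr {dp : List (List Int)} {K N : Nat} {f g : Nat → Nat → Int}
    (h : pvTab dp K N f) (hfg : ∀ i ≤ K, ∀ j ≤ N, f i j = g i j) : pvTab dp K N g := by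
  obtain ⟨h1, h2, h3⟩ := h
  exact ⟨h1, h2, fun i hi j hj => (h3 i hi j hj).trans (hfg i hi j hj)⟩

lemma pvTab_set {dp : List (List Int)} {K N : Nat} {f : Nat → Nat → Int}
    (h : pvTab dp K N f) (i j : Nat) (hi : i ≤ K) (hj : j ≤ N) (v : Int) :
    pvTab (pvSet2 dp (i:Int) (j:Int) v) K N
      (fun i' j' => if i' = i ∧ j' = j then v else f i' j') := by
  obtain ⟨hlen, hrows, hval⟩ := h
  have hi' : i < dp.length := by omega
  have hrow : PySem.List.pyGetD dp (i:Int) [] = dp.getD i [] := PySem.List.pyGetD_natCast dp i []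
  have hj' : j < (dp.getD i []).length := by rw [hrows i hi]; omega
  have hread : ∀ i' : Nat, (pvSet2 dp (i:Int) (j:Int) v).getD i' []
      = if i' = i then PySem.List.pySetD (PySem.List.pyGetD dp (i:Int) []) (j:Int) v
        else dp.getD i' [] := by
    intro i'
    rw [← PySem.List.pyGetD_natCast, pvSet2, PySem.List.pyGetD_pySetD_natCast _ _ _ _ _ hi']
    split
    · rfl
    · exact PySem.List.pyGetD_natCast dp i' []
  refine ⟨?_, ?_, ?_⟩
  · rw [pvSet2, PySem.List.length_pySetD]; exact hlen
  · intro i' hi2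
    rw [hread i']
    split
    · rw [PySem.List.length_pySetD, hrow, hrows i hi]
    · exact hrows i' hi2
  · intro i' hi2 j' hj2
    beta_reduce
    unfold pvG2
    rw [hread i']
    by_cases hii : i' = i
    · rw [if_pos hii]
      have hcol : (PySem.List.pySetD (PySem.List.pyGetD dp (i:Int) []) (j:Int) v).getD j' 0
          = if j' = j then v else (dp.getD i []).getD j' 0 := by
        rw [← PySem.List.pyGetD_natCast,
            PySem.List.pyGetD_pySetD_natCast _ _ _ _ _ (by rw [hrow]; exact hj')]
        split
        · rfl
        · rw [hrow, PySem.List.pyGetD_natCast]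
      rw [hcol]
      by_cases hjj : j' = j
      · rw [if_pos hjj, if_pos ⟨hii, hjj⟩]
      · rw [if_neg hjj, if_neg (by tauto)]
        subst hii
        exact hval i' hi2 j' hj2
    · rw [if_neg hii, if_neg (by tauto)]
      exact hval i' hi2 j' hj2

lemma pvTab_init (K N : Nat) :
    pvTab ((PySem.List.pyRange 0 ((K:Int)+1) 1).map (fun _ =>
            (PySem.List.pyRange 0 ((N:Int)+1) 1).map (fun _ => (0:Int)))) K N (fun _ _ => 0) := by
  have hrow : (PySem.List.pyRange 0 ((N:Int)+1) 1).map (fun _ => (0:Int))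
      = List.replicate (N+1) (0:Int) := by
    rw [List.map_const', PySem.List.length_pyRange_one,
        show (((N:Int)+1)-0).toNat = N+1 by omega]
  have htab : (PySem.List.pyRange 0 ((K:Int)+1) 1).map (fun _ =>
      (PySem.List.pyRange 0 ((N:Int)+1) 1).map (fun _ => (0:Int)))
      = List.replicate (K+1) (List.replicate (N+1) (0:Int)) := by
    rw [hrow, List.map_const', PySem.List.length_pyRange_one,
        show (((K:Int)+1)-0).toNat = K+1 by omega]
  rw [htab]
  have hgd : ∀ i ≤ K, (List.replicate (K+1) (List.replicate (N+1) (0:Int))).getD i []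
      = List.replicate (N+1) (0:Int) := by
    intro i hi
    rw [List.getD_eq_getElem?_getD, List.getElem?_replicate]
    simp [Nat.lt_succ_of_le hi]
  refine ⟨by simp, ?_, ?_⟩
  · intro i hi
    rw [hgd i hi, List.length_replicate]
  · intro i hi j hj
    unfold pvG2
    rw [hgd i hi, List.getD_eq_getElem?_getD, List.getElem?_replicate]
    simp [Nat.lt_succ_of_le hj]

-- table contents after phase 2 (row 1 = prefix sums, column 1 = arr[0])
def pvE2 (arr : List Int) (i j : Nat) : Int :=
  if j = 1 ∧ 1 ≤ i then arr.headD 0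
  else if i = 1 ∧ 1 ≤ j then pvS arr j else 0

-- table contents after the first i rows of phase 3 have been computed (1 ≤ i)
def pvA3 (arr : List Int) (i : Nat) (i' j : Nat) : Int :=
  if 1 ≤ i' ∧ i' ≤ i then pvRow arr (i'-1) j else pvE2 arr i' j

lemma pvPhase1 (arr : List Int) (K N : Nat) (hN : N = arr.length) (hK : 1 ≤ K) :
    pvTab ((PySem.List.pyRange 1 ((N:Int)+1) 1).foldl (fun dp i =>
        pvSet2 dp 1 i (PySem.List.slice arr none (some i)).sum)
        ((PySem.List.pyRange 0 ((K:Int)+1) 1).map (fun _ =>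
          (PySem.List.pyRange 0 ((N:Int)+1) 1).map (fun _ => (0:Int)))))
      K N (fun i j => if i = 1 ∧ 1 ≤ j then pvS arr j else 0) := by
  suffices h : ∀ m, m ≤ N → pvTab ((PySem.List.pyRange 1 ((m:Int)+1) 1).foldl (fun dp i =>
        pvSet2 dp 1 i (PySem.List.slice arr none (some i)).sum)
        ((PySem.List.pyRange 0 ((K:Int)+1) 1).map (fun _ =>
          (PySem.List.pyRange 0 ((N:Int)+1) 1).map (fun _ => (0:Int)))))
      K N (fun i j => if i = 1 ∧ 1 ≤ j ∧ j ≤ m then pvS arr j else 0) by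
    refine pvTab_congr (h N le_rfl) ?_
    intro i hi j hj
    by_cases h1 : i = 1 ∧ 1 ≤ j
    · rw [if_pos ⟨h1.1, h1.2, hj⟩, if_pos h1]
    · rw [if_neg (by tauto), if_neg h1]
  intro m
  induction m with
  | zero =>
      intro _
      rw [show (((0:Nat)):Int)+1 = 1 by norm_num, PySem.List.pyRange_one_eq_nil (le_refl 1),
          List.foldl_nil]
      refine pvTab_congr (pvTab_init K N) ?_
      intro i hi j hj
      rw [if_neg (by rintro ⟨_, h1, h2⟩; omega)]
  | succ m ih =>
      intro hm
      rw [show (((m+1:Nat)):Int)+1 = ((m:Int)+1)+1 by push_cast; ring,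
          PySem.List.pyRange_one_succ_right (by omega : (1:Int) ≤ (m:Int)+1),
          List.foldl_append, List.foldl_cons, List.foldl_nil]
      have hset := pvTab_set (ih (by omega)) 1 (m+1) hK (by omega)
        ((PySem.List.slice arr none (some ((m:Int)+1))).sum)
      push_cast at hset
      refine pvTab_congr hset ?_
      intro i' hi' j' hj'
      beta_reduce
      by_cases hc : i' = 1 ∧ j' = m+1
      · obtain ⟨e1, e2⟩ := hc
        subst e1; subst e2
        rw [if_pos ⟨rfl, rfl⟩, if_pos ⟨rfl, by omega, le_rfl⟩,
            show ((m:Int)+1) = (((m+1:Nat)):Int) by push_cast; ring,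
            PySem.List.slice_to_natCast]
        rfl
      · rw [if_neg hc]
        by_cases h1 : i' = 1 ∧ 1 ≤ j' ∧ j' ≤ m
        · rw [if_pos h1, if_pos ⟨h1.1, h1.2.1, by omega⟩]
        · rw [if_neg h1, if_neg ?_]
          rintro ⟨x, y, z⟩
          rcases eq_or_lt_of_le z with he | hl
          · exact hc ⟨x, by omega⟩
          · exact h1 ⟨x, y, by omega⟩

lemma pvPhase2 (arr : List Int) (K N : Nat) (hN : N = arr.length) (hN1 : 1 ≤ N)
    {dp : List (List Int)} (h : pvTab dp K N (fun i j => if i = 1 ∧ 1 ≤ j then pvS arr j else 0)) :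
    pvTab ((PySem.List.pyRange 1 ((K:Int)+1) 1).foldl (fun dp i =>
        pvSet2 dp i 1 (PySem.List.pyGetD arr 0 0)) dp) K N (pvE2 arr) := by
  suffices hsuf : ∀ m, m ≤ K → pvTab ((PySem.List.pyRange 1 ((m:Int)+1) 1).foldl (fun dp i =>
        pvSet2 dp i 1 (PySem.List.pyGetD arr 0 0)) dp)
      K N (fun i j => if j = 1 ∧ 1 ≤ i ∧ i ≤ m then arr.headD 0
                      else if i = 1 ∧ 1 ≤ j then pvS arr j else 0) by
    refine pvTab_congr (hsuf K le_rfl) ?_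
    intro i hi j hj
    unfold pvE2
    by_cases h1 : j = 1 ∧ 1 ≤ i
    · rw [if_pos ⟨h1.1, h1.2, hi⟩, if_pos h1]
    · rw [if_neg (by tauto), if_neg h1]
  intro m
  induction m with
  | zero =>
      intro _
      rw [show (((0:Nat)):Int)+1 = 1 by norm_num, PySem.List.pyRange_one_eq_nil (le_refl 1),
          List.foldl_nil]
      refine pvTab_congr h ?_
      intro i hi j hj
      have hno : ¬(j = 1 ∧ 1 ≤ i ∧ i ≤ 0) := by rintro ⟨_, h1, h2⟩; omega
      by_cases h1 : i = 1 ∧ 1 ≤ j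
      · rw [if_pos h1, if_neg hno]
      · rw [if_neg h1, if_neg hno]
  | succ m ih =>
      intro hm
      rw [show (((m+1:Nat)):Int)+1 = ((m:Int)+1)+1 by push_cast; ring,
          PySem.List.pyRange_one_succ_right (by omega : (1:Int) ≤ (m:Int)+1),
          List.foldl_append, List.foldl_cons, List.foldl_nil]
      have hset := pvTab_set (ih (by omega)) (m+1) 1 (by omega) hN1
        (PySem.List.pyGetD arr 0 0)
      push_cast at hset
      refine pvTab_congr hset ?_
      intro i' hi' j' hj'
      beta_reduce
      by_cases hc : i' = m+1 ∧ j' = 1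
      · obtain ⟨e1, e2⟩ := hc
        subst e1; subst e2
        rw [if_pos ⟨rfl, rfl⟩, if_pos ⟨rfl, by omega, le_rfl⟩, PySem.List.pyGetD_zero]
        cases arr <;> rfl
      · rw [if_neg hc]
        by_cases h1 : j' = 1 ∧ 1 ≤ i' ∧ i' ≤ m
        · rw [if_pos h1, if_pos ⟨h1.1, h1.2.1, by omega⟩]
        · have hn2 : ¬(j' = 1 ∧ 1 ≤ i' ∧ i' ≤ m+1) := by
            rintro ⟨x, y, z⟩
            rcases eq_or_lt_of_le z with he | hl
            · exact hc ⟨by omega, x⟩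
            · exact h1 ⟨x, y, by omega⟩
          rw [if_neg h1, if_neg hn2]

lemma pvPhase3 (arr : List Int) (K N : Nat) (hN : N = arr.length) (hK : 1 ≤ K) (hN1 : 1 ≤ N)
    (harr : arr ≠ [])
    {dp : List (List Int)} (h : pvTab dp K N (pvE2 arr)) :
    pvTab ((PySem.List.pyRange 2 ((K:Int)+1) 1).foldl (fun dp i =>
        (PySem.List.pyRange 2 ((N:Int)+1) 1).foldl (fun dp j =>
          let res : Option Int :=
            (PySem.List.pyRange 1 j 1).foldl (fun res p =>
              some (pvMinO res (max (pvGet2 dp (i-1) p)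
                                    (PySem.List.slice arr (some p) (some j)).sum))) none
          pvSet2 dp i j (res.getD 0)) dp) dp)
      K N (pvA3 arr K) := by
  suffices hsuf : ∀ m, 1 ≤ m → m ≤ K →
      pvTab ((PySem.List.pyRange 2 ((m:Int)+1) 1).foldl (fun dp i =>
        (PySem.List.pyRange 2 ((N:Int)+1) 1).foldl (fun dp j =>
          let res : Option Int :=
            (PySem.List.pyRange 1 j 1).foldl (fun res p =>
              some (pvMinO res (max (pvGet2 dp (i-1) p)
                                    (PySem.List.slice arr (some p) (some j)).sum))) none
          pvSet2 dp i j (res.getD 0)) dp) dp)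
      K N (pvA3 arr m) from hsuf K hK le_rfl
  intro m hm
  induction m, hm using Nat.le_induction with
  | base =>
      intro _
      rw [show (((1:Nat)):Int)+1 = 2 by norm_num, PySem.List.pyRange_one_eq_nil (le_refl 2),
          List.foldl_nil]
      refine pvTab_congr h ?_
      intro i hi j hj
      unfold pvA3
      by_cases hc : 1 ≤ i ∧ i ≤ 1
      · have hi1 : i = 1 := by omega
        subst hi1
        rw [if_pos hc]
        unfold pvE2 pvRow
        by_cases hj1 : j = 1
        · subst hj1
          rw [if_pos ⟨rfl, le_refl 1⟩]
          cases arr <;> simp [pvS]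
        · rw [if_neg (by tauto)]
          by_cases hj2 : 1 ≤ j
          · rw [if_pos ⟨rfl, hj2⟩]
          · rw [if_neg (by tauto), show j = 0 by omega]
            simp [pvS]
      · rw [if_neg hc]
  | succ m hm1 ih =>
      intro hmK
      rw [show (((m+1:Nat)):Int)+1 = ((m:Int)+1)+1 by push_cast; ring,
          PySem.List.pyRange_one_succ_right (by omega : (2:Int) ≤ (m:Int)+1),
          List.foldl_append, List.foldl_cons, List.foldl_nil]
      have hprev := ih (by omega)
      revert hprev
      generalize (PySem.List.pyRange 2 ((m:Int)+1) 1).foldl _ _ = dq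
      intro hprev
      have hinner : ∀ mj, 1 ≤ mj → mj ≤ N →
          pvTab ((PySem.List.pyRange 2 ((mj:Int)+1) 1).foldl (fun dp j =>
            let res : Option Int :=
              (PySem.List.pyRange 1 j 1).foldl (fun res p =>
                some (pvMinO res (max (pvGet2 dp ((m:Int)+1-1) p)
                                      (PySem.List.slice arr (some p) (some j)).sum))) none
            pvSet2 dp ((m:Int)+1) j (res.getD 0)) dq)
          K N (fun i' j' => if i' = m+1 ∧ 2 ≤ j' ∧ j' ≤ mj then pvRow arr m j'
                            else pvA3 arr m i' j') := by
        intro mj hmj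
        induction mj, hmj using Nat.le_induction with
        | base =>
            intro _
            rw [show (((1:Nat)):Int)+1 = 2 by norm_num, PySem.List.pyRange_one_eq_nil (le_refl 2),
                List.foldl_nil]
            refine pvTab_congr hprev ?_
            intro i' hi' j' hj'
            rw [if_neg (by rintro ⟨_, h2, h3⟩; omega)]
        | succ mj hmj1 ihj =>
            intro hmjN
            rw [show (((mj+1:Nat)):Int)+1 = ((mj:Int)+1)+1 by push_cast; ring,
                PySem.List.pyRange_one_succ_right (by omega : (2:Int) ≤ (mj:Int)+1),
                List.foldl_append, List.foldl_cons, List.foldl_nil]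
            have hSM := ihj (by omega)
            revert hSM
            generalize (PySem.List.pyRange 2 ((mj:Int)+1) 1).foldl _ dq = SM
            intro hSM
            refine pvTab_congr (pvTab_set hSM (m+1) (mj+1) (by omega) (by omega)
              (((PySem.List.pyRange 1 ((mj:Int)+1) 1).foldl (fun res p =>
                some (pvMinO res (max (pvGet2 SM ((m:Int)+1-1) p)
                                      (PySem.List.slice arr (some p) (some ((mj:Int)+1))).sum)))
                none).getD 0)) ?_
            intro i' hi' j' hj'
            beta_reduce
            by_cases hc : i' = m+1 ∧ j' = mj+1
            · obtain ⟨e1, e2⟩ := hc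
              subst e1; subst e2
              rw [if_pos ⟨rfl, rfl⟩, if_pos ⟨rfl, by omega, le_rfl⟩]
              -- the freshly computed minimum is the next-row value pvRow arr m (mj+1)
              have h1 : ((PySem.List.pyRange 1 ((mj:Int)+1) 1).foldl (fun res p =>
                  some (pvMinO res (max (pvGet2 SM ((m:Int)+1-1) p)
                      (PySem.List.slice arr (some p) (some ((mj:Int)+1))).sum))) none).getD 0
                  = pvMinL ((PySem.List.pyRange 1 ((mj:Int)+1) 1).map (fun p =>
                      max (pvGet2 SM ((m:Int)+1-1) p)
                          (PySem.List.slice arr (some p) (some ((mj:Int)+1))).sum)) := by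
                rw [pvMinL, List.foldl_map]
              rw [h1, pyRange_one_nat_map]
              have h2 : (List.range mj).map (fun (t : Nat) =>
                    max (pvGet2 SM ((m:Int)+1-1) ((t:Int)+1))
                        (PySem.List.slice arr (some ((t:Int)+1)) (some ((mj:Int)+1))).sum)
                  = (List.range mj).map (fun (t : Nat) =>
                      max (pvRow arr (m-1) (t+1)) (pvS arr (mj+1) - pvS arr (t+1))) := by
                apply List.map_congr_left
                intro t ht
                rw [List.mem_range] at ht
                have c1 : ((t:Int)+1) = (((t+1:Nat)):Int) := by push_cast; ring
                have c2 : ((mj:Int)+1) = (((mj+1:Nat)):Int) := by push_cast; ring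
                have c3 : ((m:Int)+1-1) = ((m:Nat):Int) := by ring
                rw [c1, c2, c3, pvG2_natCast, pvSum_slice arr (t+1) (mj+1) (by omega),
                    hSM.2.2 m (by omega) (t+1) (by omega)]
                beta_reduce
                rw [if_neg (by rintro ⟨e, _, _⟩; omega)]
                unfold pvA3
                rw [if_pos ⟨hm1, le_rfl⟩]
              rw [h2, ← pvRowNext_succ arr (pvRow arr (m-1)) mj hmj1,
                  show m = (m-1)+1 by omega]
              rfl
            · rw [if_neg hc]
              by_cases h1 : i' = m+1 ∧ 2 ≤ j' ∧ j' ≤ mj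
              · rw [if_pos h1, if_pos ⟨h1.1, h1.2.1, by omega⟩]
              · have hn2 : ¬(i' = m+1 ∧ 2 ≤ j' ∧ j' ≤ mj+1) := by
                  rintro ⟨x, y, z⟩
                  rcases eq_or_lt_of_le z with he | hl
                  · exact hc ⟨x, by omega⟩
                  · exact h1 ⟨x, y, by omega⟩
                rw [if_neg h1, if_neg hn2]
      refine pvTab_congr (hinner N hN1 le_rfl) ?_
      intro i' hi' j' hj'
      by_cases hc : i' = m+1
      · subst hc
        by_cases h2 : 2 ≤ j'
        · rw [if_pos ⟨rfl, h2, hj'⟩]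
          unfold pvA3
          rw [if_pos ⟨by omega, le_rfl⟩, show (m+1)-1 = m by omega]
        · rw [if_neg (by tauto)]
          unfold pvA3
          rw [if_neg (by rintro ⟨_, hx⟩; omega), if_pos ⟨by omega, le_rfl⟩,
              show (m+1)-1 = m by omega]
          unfold pvE2
          by_cases hj1 : j' = 1
          · subst hj1
            rw [if_pos ⟨rfl, by omega⟩, pvRow_one]
          · rw [if_neg (by tauto), if_neg (by rintro ⟨e, _⟩; omega),
                show j' = 0 by omega, pvRow_zero]
      · rw [if_neg (by tauto)]
        unfold pvA3
        by_cases h1 : 1 ≤ i' ∧ i' ≤ m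
        · rw [if_pos h1, if_pos ⟨h1.1, by omega⟩]
        · rw [if_neg h1, if_neg (by rintro ⟨x, y⟩; exact h1 ⟨x, by omega⟩)]

lemma pvA_eq (arr : List Int) (k : Int) (hk : 1 ≤ k) (harr : arr ≠ []) :
    minPagesDP arr k = pvRow arr (k.toNat - 1) arr.length := by
  have harr1 : 1 ≤ arr.length := List.length_pos_of_ne_nil harr
  have hK1 : 1 ≤ k.toNat := by omega
  have hkc : k = ((k.toNat : Nat) : Int) := by omega
  have h3 := pvPhase3 arr k.toNat arr.length rfl hK1 harr1 harr
    (pvPhase2 arr k.toNat arr.length rfl harr1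
      (pvPhase1 arr k.toNat arr.length rfl hK1))
  simp only [minPagesDP]
  rw [hkc, pvG2_natCast, h3.2.2 k.toNat le_rfl arr.length le_rfl]
  unfold pvA3
  rw [if_pos ⟨hK1, le_rfl⟩, Int.toNat_natCast]

-- ===== VERDICT (by name: the statement is the Claim_ definition above) =====
theorem minPagesDP_spec : Claim_equal_minPagesDP := by
  intro arr k _ hpre
  unfold Spec_minPagesDP
  rcases hpre with ⟨hk, harr⟩ | ⟨hk, harr⟩
  · rw [pvA_eq arr k hk harr, pvB_eq arr k hk harr]
  · subst hk; subst harr; rfl
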